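-- pv_equiv track=rewrite | github.com/Charles-DEV-1/test | main.py | sliding_triple_ones
-- ===== SOURCE A (Python) =====
-- def sliding_triple_ones(input_bits):
--     """For each index i produce '1' if the 3-bit window ending at i is '111', else '0'.
--        The output string has same length as input (leading positions will be '0' because
--        there's no full 3-bit window until index 2)."""
--     out = []
--     for i in range(len(input_bits)):
--         if i-2 >= 0 and input_bits[i-2:i+1] == "111":
--             out.append("1")
--         else:
--             out.append("0")
--     return "".join(out)
-- ===== SOURCE B (Python) =====
-- def sliding_triple_ones(input_bits):
--     run = 0
--     out = []
--     for c in input_bits: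
--         run = run + 1 if c == "1" else 0
--         out.append("1" if run >= 3 else "0")
--     return "".join(out)
-- ===== Notes on version B (the rewrite author's own statement) =====
-- stated objective: alternative
-- what changed: Replaces the per-index 3-character slice-and-compare window with a single pass maintaining a run-length counter of consecutive one-bits, emitting a set bit exactly when the run reaches 3.
import Mathlib
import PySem

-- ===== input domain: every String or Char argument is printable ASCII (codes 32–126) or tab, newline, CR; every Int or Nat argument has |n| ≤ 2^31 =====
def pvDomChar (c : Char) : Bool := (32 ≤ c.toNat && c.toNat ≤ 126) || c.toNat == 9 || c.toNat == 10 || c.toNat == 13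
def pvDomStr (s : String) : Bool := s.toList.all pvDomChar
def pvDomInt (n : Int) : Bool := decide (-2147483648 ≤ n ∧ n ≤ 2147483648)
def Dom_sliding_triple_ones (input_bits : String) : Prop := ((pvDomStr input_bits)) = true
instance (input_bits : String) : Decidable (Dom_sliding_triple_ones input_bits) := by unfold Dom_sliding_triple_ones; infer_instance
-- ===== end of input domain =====

-- B replaces A's per-index 3-char slice-and-compare window by a single pass with a
-- run-length counter of consecutive '1' characters (alternative decomposition, same cost).


-- ===== PORT A =====
-- loop over range(len(input_bits)); the slice input_bits[i-2:i+1] compared to "111",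
-- appending '1'/'0' per index; ''.join at the end is String.ofList of the collected chars.
def sliding_triple_ones (input_bits : String) : String :=
  let cs := input_bits.toList
  let out := (PySem.List.pyRange 0 (cs.length : Int) 1).foldl
    (fun (out : List Char) (i : Int) =>
      if 0 ≤ i - 2 ∧ PySem.List.slice cs (some (i - 2)) (some (i + 1)) = ['1', '1', '1']
      then out ++ ['1'] else out ++ ['0']) []
  String.ofList out

-- ===== PORT B =====
-- one pass over the characters; state = (collected output, current run of consecutive '1's)
def sliding_triple_ones_alt (input_bits : String) : String :=
  let res := input_bits.toList.foldl
    (fun (st : List Char × Nat) c =>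
      let run' := if c = '1' then st.2 + 1 else 0
      (st.1 ++ [if 3 ≤ run' then '1' else '0'], run')) ([], 0)
  String.ofList res.1

-- ===== PRECONDITION & SPEC =====
def Spec_sliding_triple_ones (input_bits : String) (out : String) : Prop := out = sliding_triple_ones_alt input_bits
instance (input_bits : String) (out : String) : Decidable (Spec_sliding_triple_ones input_bits out) := by unfold Spec_sliding_triple_ones; infer_instance

-- ===== CLAIM (what is proved, stated in full; the proofs are below) =====
def Claim_equal_sliding_triple_ones : Prop := ∀ (input_bits : String), Dom_sliding_triple_ones input_bits → Spec_sliding_triple_ones input_bits (sliding_triple_ones input_bits)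

-- ===== LEMMAS AND PROOFS =====

-- proof-side cons form of B's loop
def pvRunGo : List Char → Nat → List Char
  | [], _ => []
  | c :: rest, run =>
    let run' := if c = '1' then run + 1 else 0
    (if 3 ≤ run' then '1' else '0') :: pvRunGo rest run'

theorem altGo_eq_runGo (cs : List Char) (acc : List Char) (r : Nat) :
    (cs.foldl (fun (st : List Char × Nat) c =>
      let run' := if c = '1' then st.2 + 1 else 0
      (st.1 ++ [if 3 ≤ run' then '1' else '0'], run')) (acc, r)).1 = acc ++ pvRunGo cs r := by
  induction cs generalizing acc r with
  | nil => simp [pvRunGo]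
  | cons c rest ih => simp [pvRunGo, ih, List.append_assoc]

-- proof-side window form: previous two characters carried explicitly
def pvWin : Char → Char → List Char → List Char
  | _, _, [] => []
  | a, b, c :: rest => (if [a, b, c] = ['1', '1', '1'] then '1' else '0') :: pvWin b c rest

theorem runGo_eq_win (cs : List Char) (a b : Char) (r : Nat)
    (h1 : 1 ≤ r ↔ b = '1') (h2 : 2 ≤ r ↔ (a = '1' ∧ b = '1')) :
    pvRunGo cs r = pvWin a b cs := by
  induction cs generalizing a b r with
  | nil => rfl
  | cons c rest ih =>
    simp only [pvRunGo, pvWin]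
    by_cases hc : c = '1'
    · rw [if_pos hc]
      congr 1
      · have h3 : (3 ≤ r + 1) ↔ (a = '1' ∧ b = '1') := by rw [← h2]; omega
        have h4 : ([a, b, c] = ['1', '1', '1']) ↔ (a = '1' ∧ b = '1') := by simp [hc]
        simp only [h3, h4]
      · refine ih b c (r + 1) (by simp [hc]) ?_
        constructor
        · intro h; exact ⟨h1.mp (by omega), hc⟩
        · intro h; have := h1.mpr h.1; omega
    · rw [if_neg hc]
      congr 1
      · have h4 : ¬([a, b, c] = ['1', '1', '1']) := by simp [hc]
        simp [h4]
      · exact ih b c 0 (by simp [hc]) (by simp [hc])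

theorem win_eq_map (cs : List Char) (a b : Char) :
    pvWin a b cs = (List.range cs.length).map
      (fun k => if (((a :: b :: cs).drop k).take 3 = ['1', '1', '1']) then '1' else '0') := by
  induction cs generalizing a b with
  | nil => rfl
  | cons c rest ih =>
    simp only [pvWin, List.length_cons, List.range_succ_eq_map, List.map_cons, List.map_map]
    congr 1
    rw [ih b c]
    exact List.map_congr_left (fun k _ => rfl)

theorem sliding_triple_ones_spec : Claim_equal_sliding_triple_ones := by
  intro s _
  unfold Spec_sliding_triple_ones sliding_triple_ones sliding_triple_ones_alt
  set cs := s.toList with hcs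
  simp only
  rw [altGo_eq_runGo cs [] 0, List.nil_append,
      runGo_eq_win cs '0' '0' 0 (by simp) (by simp), win_eq_map]
  congr 1
  -- A's side: turn the foldl into a map over range, then compare pointwise
  have hfold := PySem.List.foldl_congr_mem
      (l := PySem.List.pyRange 0 (cs.length : Int) 1)
      (f := fun (out : List Char) (i : Int) =>
        if 0 ≤ i - 2 ∧ PySem.List.slice cs (some (i - 2)) (some (i + 1)) = ['1', '1', '1']
        then out ++ ['1'] else out ++ ['0'])
      (g := fun (out : List Char) (i : Int) =>
        out ++ [if 0 ≤ i - 2 ∧ PySem.List.slice cs (some (i - 2)) (some (i + 1)) = ['1', '1', '1']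
                then '1' else '0'])
      (init := ([] : List Char))
      (by intro acc x _; dsimp only; split <;> rfl)
  rw [hfold, PySem.List.foldl_append_singleton_eq_map, List.nil_append,
      PySem.List.pyRange_zero_natCast, List.map_map]
  apply List.map_congr_left
  intro k hk
  have hk' : k < cs.length := List.mem_range.mp hk
  simp only [Function.comp]
  by_cases h2 : 2 ≤ k
  · have e1 : ((k : Int) - 2) = ((k - 2 : Nat) : Int) := by omega
    have e2 : ((k : Int) + 1) = ((k + 1 : Nat) : Int) := by push_cast; ring
    have hslice : PySem.List.slice cs (some ((k : Int) - 2)) (some ((k : Int) + 1))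
        = (cs.drop (k - 2)).take 3 := by
      rw [e1, e2, PySem.List.slice_natCast]
      congr 1
      omega
    have hdrop : (('0' : Char) :: '0' :: cs).drop k = cs.drop (k - 2) := by
      rw [show k = (k - 2) + 2 by omega]
      rfl
    rw [hslice, hdrop]
    simp [h2]
  · -- k = 0 or 1 : A's guard is false; B's window starts with the '0' padding
    have hB : ¬ ((((('0' : Char) :: '0' :: cs).drop k).take 3) = ['1', '1', '1']) := by
      interval_cases k
      · cases cs <;> simp
      · cases cs with
        | nil => simp
        | cons c t => cases t <;> simp
    simp [h2, hB]
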